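-- pv_equiv track=rewrite | github.com/umadorna1234567/Auto-offset-updater-for-any-game | app.py | score_signature_match
-- ===== SOURCE A (Python) =====
-- def score_signature_match(old_tokens: list[str], candidate_tokens: list[str]) -> int:
--     limit = min(len(old_tokens), len(candidate_tokens))
--     exact_matches = 0
--     wildcard_matches = 0
--     longest_run = 0
--     current_run = 0
--
--     for idx in range(limit):
--         old_token = old_tokens[idx]
--         candidate_token = candidate_tokens[idx]
--         compatible = (
--             old_token == candidate_token
--             or old_token == "?"
--             or candidate_token == "?"
--         )
--         if compatible:
--             current_run += 1
--             longest_run = max(longest_run, current_run)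
--             if old_token == candidate_token:
--                 exact_matches += 1
--             else:
--                 wildcard_matches += 1
--         else:
--             current_run = 0
--
--     return (longest_run * 10) + (exact_matches * 3) + wildcard_matches - abs(len(old_tokens) - len(candidate_tokens))
-- ===== SOURCE B (Python) =====
-- def score_signature_match(old_tokens: list[str], candidate_tokens: list[str]) -> int:
--     pairs = list(zip(old_tokens, candidate_tokens))
--     exact = sum(1 for o, c in pairs if o == c)
--     wildcard = sum(1 for o, c in pairs if o != c and (o == "?" or c == "?"))
--     # longest compatible run = largest gap between consecutive incompatible positions
--     bad = [i for i, (o, c) in enumerate(pairs) if not (o == c or o == "?" or c == "?")]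
--     bounds = [-1] + bad + [len(pairs)]
--     longest = max(b - a - 1 for a, b in zip(bounds, bounds[1:]))
--     return longest * 10 + exact * 3 + wildcard - abs(len(old_tokens) - len(candidate_tokens))
-- ===== Notes on version B (the rewrite author's own statement) =====
-- stated objective: alternative
-- what changed: A's single fused loop with four running counters is replaced by three independent passes over the zipped token pairs: two count comprehensions for exact and wildcard matches, and the longest compatible run computed as the largest gap between consecutive incompatible positions (with -1 and len sentinels) instead of a running-counter max.
import Mathlib
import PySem

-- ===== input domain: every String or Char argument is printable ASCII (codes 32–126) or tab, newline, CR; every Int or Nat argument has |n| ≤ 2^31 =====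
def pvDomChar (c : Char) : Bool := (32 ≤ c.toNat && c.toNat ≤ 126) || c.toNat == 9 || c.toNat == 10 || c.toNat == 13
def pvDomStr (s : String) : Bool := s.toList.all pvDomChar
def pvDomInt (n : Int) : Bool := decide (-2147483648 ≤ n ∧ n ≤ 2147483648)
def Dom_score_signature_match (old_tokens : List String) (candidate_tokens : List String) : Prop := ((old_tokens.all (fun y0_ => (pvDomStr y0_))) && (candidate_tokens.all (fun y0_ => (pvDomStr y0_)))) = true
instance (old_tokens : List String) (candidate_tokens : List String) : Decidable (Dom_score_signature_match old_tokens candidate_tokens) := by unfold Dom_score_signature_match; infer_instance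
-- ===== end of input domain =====

-- B replaces A's fused counter loop by three separate passes (two counts and a
-- largest-gap-between-incompatible-positions computation of the longest run); objective: alternative decomposition, not speed.

-- ===== PORT A =====
-- loop body of A's `for idx in range(limit)` loop; state = (exact_matches, wildcard_matches, longest_run, current_run).
-- Indices produced by the range are always in bounds, so pyGetD's default "" is never used.
def pvStepA (old_tokens candidate_tokens : List String) (st : Int × Int × Int × Int) (idx : Int) : Int × Int × Int × Int :=
  let old_token := PySem.List.pyGetD old_tokens idx ""
  let candidate_token := PySem.List.pyGetD candidate_tokens idx ""
  let compatible := (old_token == candidate_token) || (old_token == "?") || (candidate_token == "?")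
  if compatible then
    let current_run := st.2.2.2 + 1
    let longest_run := max st.2.2.1 current_run
    if old_token == candidate_token then (st.1 + 1, st.2.1, longest_run, current_run)
    else (st.1, st.2.1 + 1, longest_run, current_run)
  else (st.1, st.2.1, st.2.2.1, 0)

def score_signature_match (old_tokens : List String) (candidate_tokens : List String) : Int :=
  let limit : Int := min (old_tokens.length : Int) (candidate_tokens.length : Int)
  let st := (PySem.List.pyRange 0 limit 1).foldl (pvStepA old_tokens candidate_tokens) (0, 0, 0, 0)
  st.2.2.1 * 10 + st.1 * 3 + st.2.1 - |(old_tokens.length : Int) - (candidate_tokens.length : Int)|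

-- ===== PORT B =====
def pvCompat (p : String × String) : Bool := (p.1 == p.2) || (p.1 == "?") || (p.2 == "?")

def score_signature_match_alt (old_tokens : List String) (candidate_tokens : List String) : Int :=
  let pairs := old_tokens.zip candidate_tokens
  -- sum(1 for … if p) is the count of elements satisfying p
  let exact : Int := (pairs.countP (fun p => p.1 == p.2) : Nat)
  let wildcard : Int := (pairs.countP (fun p => !(p.1 == p.2) && ((p.1 == "?") || (p.2 == "?"))) : Nat)
  let bad : List Int := ((PySem.List.enumerate pairs 0).filter (fun e => !(pvCompat e.2))).map (fun e => e.1)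
  let bounds : List Int := -1 :: (bad ++ [(pairs.length : Int)])
  -- bounds has ≥ 2 elements, so the gap list is nonempty and Python's max never sees an empty sequence; getD's 0 is never used
  let longest : Int := ((PySem.List.max? ((bounds.zip bounds.tail).map (fun p => p.2 - p.1 - 1)) (fun y => y)).getD 0)
  longest * 10 + exact * 3 + wildcard - |(old_tokens.length : Int) - (candidate_tokens.length : Int)|

-- ===== PRECONDITION & SPEC =====
def Spec_score_signature_match (old_tokens : List String) (candidate_tokens : List String) (out : Int) : Prop := out = score_signature_match_alt old_tokens candidate_tokens
instance (old_tokens : List String) (candidate_tokens : List String) (out : Int) : Decidable (Spec_score_signature_match old_tokens candidate_tokens out) := by unfold Spec_score_signature_match; infer_instance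

-- ===== CLAIM (what is proved, stated in full; the proofs are below) =====
def Claim_equal_score_signature_match : Prop := ∀ (old_tokens : List String) (candidate_tokens : List String), Dom_score_signature_match old_tokens candidate_tokens → Spec_score_signature_match old_tokens candidate_tokens (score_signature_match old_tokens candidate_tokens)

-- ===== LEMMAS AND PROOFS =====

-- A's loop rephrased structurally on the list of aligned pairs
def pvLoopA : List (String × String) → Int × Int × Int × Int → Int × Int × Int × Int
  | [], st => st
  | p :: l, st =>
      pvLoopA l (if pvCompat p then
          (if p.1 == p.2 then (st.1 + 1, st.2.1, max st.2.2.1 (st.2.2.2 + 1), st.2.2.2 + 1)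
           else (st.1, st.2.1 + 1, max st.2.2.1 (st.2.2.2 + 1), st.2.2.2 + 1))
        else (st.1, st.2.1, st.2.2.1, 0))

-- longest-run component of A's loop, in isolation (state = (longest, current))
def pvFA : List (String × String) → Int × Int → Int × Int
  | [], s => s
  | p :: l, s => if pvCompat p then pvFA l (max s.1 (s.2 + 1), s.2 + 1) else pvFA l (s.1, 0)

-- reference value of the longest compatible run, given `cur` compatible positions immediately before
def pvRun : List (String × String) → Int → Int
  | [], cur => cur
  | p :: l, cur => if pvCompat p then pvRun l (cur + 1) else max cur (pvRun l 0)

-- positions (from s) of incompatible pairs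
def pvBad : List (String × String) → Int → List Int
  | [], _ => []
  | p :: l, s => if pvCompat p then pvBad l (s + 1) else s :: pvBad l (s + 1)

def pvGapsFold (bs : List Int) (acc : Int) : Int :=
  ((bs.zip bs.tail).map (fun p => p.2 - p.1 - 1)).foldl max acc

theorem pvLoopA_pyRange : ∀ (n k : Nat) (xs ys : List String) (st : Int × Int × Int × Int),
    k + n = min xs.length ys.length →
    (PySem.List.pyRange (k : Int) (min (xs.length : Int) (ys.length : Int)) 1).foldl (pvStepA xs ys) st
      = pvLoopA ((xs.drop k).zip (ys.drop k)) st := by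
  intro n
  induction n with
  | zero =>
      intro k xs ys st hk
      have hlim : min ((xs.length : Int)) ((ys.length : Int)) ≤ (k : Int) := by
        rw [← Nat.cast_min]; exact_mod_cast Nat.le_of_eq (by omega)
      rw [PySem.List.pyRange_one_eq_nil hlim]
      rcases le_total xs.length ys.length with h | h
      · have hx : xs.drop k = [] := List.drop_eq_nil_of_le (by omega)
        rw [hx]
        simp [pvLoopA]
      · have hy : ys.drop k = [] := List.drop_eq_nil_of_le (by omega)
        rw [hy]
        simp [pvLoopA]
  | succ n ih =>
      intro k xs ys st hk
      have hkmin : k < min xs.length ys.length := by omega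
      have hkx : k < xs.length := lt_of_lt_of_le hkmin (min_le_left _ _)
      have hky : k < ys.length := lt_of_lt_of_le hkmin (min_le_right _ _)
      have hlt : (k : Int) < min ((xs.length : Int)) ((ys.length : Int)) := by
        rw [← Nat.cast_min]; exact_mod_cast hkmin
      rw [PySem.List.pyRange_one_cons hlt, List.foldl_cons]
      have h1 : ((k : Int) + 1) = (((k + 1 : Nat)) : Int) := by push_cast; ring_nf
      rw [h1, ih (k + 1) xs ys _ (by omega)]
      rw [List.drop_eq_getElem_cons hkx, List.drop_eq_getElem_cons hky, List.zip_cons_cons]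
      simp only [pvLoopA]
      congr 1
      simp only [pvStepA, pvCompat, PySem.List.pyGetD_natCast,
        List.getD_eq_getElem _ _ hkx, List.getD_eq_getElem _ _ hky]
      split_ifs <;> rfl

theorem pvLoopA_decomp : ∀ (l : List (String × String)) (e w L cur : Int),
    pvLoopA l (e, w, L, cur)
      = (e + ((l.countP (fun p => p.1 == p.2) : Nat) : Int),
         w + ((l.countP (fun p => !(p.1 == p.2) && ((p.1 == "?") || (p.2 == "?"))) : Nat) : Int),
         pvFA l (L, cur)) := by
  intro l
  induction l with
  | nil => intro e w L cur; simp [pvLoopA, pvFA]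
  | cons p l ih =>
      intro e w L cur
      by_cases hc : pvCompat p = true
      · by_cases he : (p.1 == p.2) = true
        · have hw : (!(p.1 == p.2) && ((p.1 == "?") || (p.2 == "?"))) = false := by simp [he]
          have hE : List.countP (fun q => q.1 == q.2) (p :: l) = List.countP (fun q => q.1 == q.2) l + 1 := by
            simp [he]
          have hW : List.countP (fun q => !(q.1 == q.2) && ((q.1 == "?") || (q.2 == "?"))) (p :: l)
              = List.countP (fun q => !(q.1 == q.2) && ((q.1 == "?") || (q.2 == "?"))) l := by
            simp [hw]
          simp only [pvLoopA, pvFA, hc, he, if_true]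
          rw [ih, hE, hW, Prod.mk.injEq, Prod.mk.injEq]
          refine ⟨by omega, by omega, rfl⟩
        · have hw : (!(p.1 == p.2) && ((p.1 == "?") || (p.2 == "?"))) = true := by
            simp only [pvCompat, he, Bool.false_or] at hc
            simp [he, hc]
          have hE : List.countP (fun q => q.1 == q.2) (p :: l) = List.countP (fun q => q.1 == q.2) l := by
            simp [he]
          have hW : List.countP (fun q => !(q.1 == q.2) && ((q.1 == "?") || (q.2 == "?"))) (p :: l)
              = List.countP (fun q => !(q.1 == q.2) && ((q.1 == "?") || (q.2 == "?"))) l + 1 := by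
            simp [hw]
          simp only [pvLoopA, pvFA, hc, he, Bool.false_eq_true, if_true, if_false]
          rw [ih, hE, hW, Prod.mk.injEq, Prod.mk.injEq]
          refine ⟨by omega, by omega, rfl⟩
      · simp only [pvCompat, Bool.or_eq_true, not_or] at hc
        have he : (p.1 == p.2) = false := by
          cases h : (p.1 == p.2) <;> simp_all
        have hw : (!(p.1 == p.2) && ((p.1 == "?") || (p.2 == "?"))) = false := by
          cases h1 : (p.1 == "?") <;> cases h2 : (p.2 == "?") <;> simp_all
        have hc' : pvCompat p = false := by
          simp only [pvCompat, he, Bool.false_or]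
          cases h1 : (p.1 == "?") <;> cases h2 : (p.2 == "?") <;> simp_all
        have hE : List.countP (fun q => q.1 == q.2) (p :: l) = List.countP (fun q => q.1 == q.2) l := by
          simp [he]
        have hW : List.countP (fun q => !(q.1 == q.2) && ((q.1 == "?") || (q.2 == "?"))) (p :: l)
            = List.countP (fun q => !(q.1 == q.2) && ((q.1 == "?") || (q.2 == "?"))) l := by
          simp [hw]
        simp only [pvLoopA, pvFA, hc', Bool.false_eq_true, if_false]
        rw [ih, hE, hW]

theorem pvRun_ge : ∀ (l : List (String × String)) (cur : Int), cur ≤ pvRun l cur := by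
  intro l
  induction l with
  | nil => intro cur; simp [pvRun]
  | cons p l ih =>
      intro cur
      by_cases h : pvCompat p = true
      · simp [pvRun, h]; have := ih (cur + 1); omega
      · simp [pvRun, h]

theorem pvFA_fst : ∀ (l : List (String × String)) (L cur : Int), 0 ≤ cur → cur ≤ L →
    (pvFA l (L, cur)).1 = max L (pvRun l cur) := by
  intro l
  induction l with
  | nil => intro L cur h0 hL; simp [pvFA, pvRun]; omega
  | cons p l ih =>
      intro L cur h0 hL
      by_cases h : pvCompat p = true
      · simp only [pvFA, pvRun, h, if_true]
        rw [ih (max L (cur + 1)) (cur + 1) (by omega) (by omega)]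
        have := pvRun_ge l (cur + 1)
        omega
      · simp only [pvFA, pvRun, h, if_false, Bool.false_eq_true]
        rw [ih L 0 le_rfl (by omega)]
        have := pvRun_ge l 0
        omega

theorem pvBad_eq : ∀ (l : List (String × String)) (s : Int),
    ((PySem.List.enumerate l s).filter (fun e => !(pvCompat e.2))).map (fun e => e.1) = pvBad l s := by
  intro l
  induction l with
  | nil => intro s; simp [PySem.List.enumerate_nil, pvBad]
  | cons p l ih =>
      intro s
      by_cases h : pvCompat p = true
      · simp [PySem.List.enumerate_cons, pvBad, h, ih]
      · simp [PySem.List.enumerate_cons, pvBad, h, ih]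

theorem pvBad_ge : ∀ (l : List (String × String)) (s p : Int), p ∈ pvBad l s → s ≤ p := by
  intro l
  induction l with
  | nil => intro s p h; simp [pvBad] at h
  | cons q l ih =>
      intro s p h
      by_cases hc : pvCompat q = true
      · simp [pvBad, hc] at h; have := ih (s + 1) p h; omega
      · simp [pvBad, hc] at h
        rcases h with h | h
        · omega
        · have := ih (s + 1) p h; omega

theorem pvGapsFold_cons₂ (a b : Int) (t : List Int) (acc : Int) :
    pvGapsFold (a :: b :: t) acc = pvGapsFold (b :: t) (max acc (b - a - 1)) := by
  simp [pvGapsFold]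

theorem pvGapsFold_spec : ∀ (l : List (String × String)) (s a acc : Int), a + 1 ≤ s →
    pvGapsFold (a :: (pvBad l s ++ [s + (l.length : Int)])) acc = max acc (pvRun l (s - a - 1)) := by
  intro l
  induction l with
  | nil =>
      intro s a acc h
      simp [pvBad, pvRun, pvGapsFold]
  | cons p l ih =>
      intro s a acc h
      by_cases hc : pvCompat p = true
      · have hlist : (a :: (pvBad (p :: l) s ++ [s + ((p :: l).length : Int)]))
            = a :: (pvBad l (s + 1) ++ [(s + 1) + (l.length : Int)]) := by
          simp [pvBad, hc]; omega
        rw [hlist, ih (s + 1) a acc (by omega)]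
        simp only [pvRun, hc, if_true]
        congr 2
        ring
      · have hlist : (a :: (pvBad (p :: l) s ++ [s + ((p :: l).length : Int)]))
            = a :: s :: (pvBad l (s + 1) ++ [(s + 1) + (l.length : Int)]) := by
          simp [pvBad, hc]; omega
        rw [hlist, pvGapsFold_cons₂, ih (s + 1) s (max acc (s - a - 1)) (by omega)]
        have h1 : s + 1 - s - 1 = (0 : Int) := by ring
        rw [h1]
        simp only [pvRun, hc, Bool.false_eq_true, if_false]
        have := pvRun_ge l 0
        omega

theorem pvLongest_eq (pairs : List (String × String)) :
    ((PySem.List.max? (((( -1 :: (pvBad pairs 0 ++ [(pairs.length : Int)])).zip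
        ((-1 :: (pvBad pairs 0 ++ [(pairs.length : Int)])).tail)).map (fun p => p.2 - p.1 - 1))) (fun y => y)).getD 0)
      = pvRun pairs 0 := by
  have hne : ∃ c t, pvBad pairs 0 ++ [(pairs.length : Int)] = c :: t ∧ 0 ≤ c := by
    cases h : pvBad pairs 0 with
    | nil => exact ⟨(pairs.length : Int), [], rfl, by positivity⟩
    | cons x xs =>
        refine ⟨x, xs ++ [(pairs.length : Int)], rfl, ?_⟩
        have := pvBad_ge pairs 0 x (by rw [h]; simp)
        omega
  obtain ⟨c, t, hct, hc0⟩ := hne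
  have hfold : pvGapsFold (-1 :: (pvBad pairs 0 ++ [(pairs.length : Int)])) 0
      = max 0 (pvRun pairs 0) := by
    have := pvGapsFold_spec pairs 0 (-1) 0 (by omega)
    simpa using this
  rw [hct] at hfold ⊢
  have hzip : (((-1 : Int) :: c :: t).zip (((-1 : Int) :: c :: t).tail)).map (fun p => p.2 - p.1 - 1)
      = (c - (-1) - 1) :: (((c :: t).zip t).map (fun p => p.2 - p.1 - 1)) := by
    simp
  rw [hzip, PySem.List.max?_id_cons]
  simp only [Option.getD_some]
  have hg0 : max 0 (c - (-1) - 1) = c - (-1) - 1 := by omega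
  have hfold2 : pvGapsFold ((-1 : Int) :: c :: t) 0
      = (((c :: t).zip t).map (fun p => p.2 - p.1 - 1)).foldl max (c - (-1) - 1) := by
    simp only [pvGapsFold, hzip, List.foldl_cons, hg0]
  rw [hfold2] at hfold
  rw [hfold]
  have := pvRun_ge pairs 0
  omega

-- ===== VERDICT (by name: the statement is the Claim_ definition above) =====
theorem score_signature_match_spec : Claim_equal_score_signature_match := by
  intro xs ys _
  have hloop := pvLoopA_pyRange (min xs.length ys.length) 0 xs ys (0, 0, 0, 0) (by omega)
  simp only [Nat.cast_zero, List.drop_zero] at hloop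
  unfold Spec_score_signature_match score_signature_match score_signature_match_alt
  simp only [hloop, pvLoopA_decomp, pvBad_eq, pvLongest_eq, pvFA_fst _ 0 0 le_rfl le_rfl]
  have h := pvRun_ge (xs.zip ys) 0
  rw [max_eq_right h]
  ring
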